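-- pv_equiv track=rewrite | github.com/guimmp92/python | url_shortener.py | solution
-- ===== SOURCE A (Python) =====
-- def solution(number):
--     """
--     >>> solution(12345)
--     ('dnh', 12345)
--     """
--
--     # Convert int to base62 string.
--     base62_map = "abcdefghijklmnopqrstuvwxyzABCDEFGHIJKLMNOPQRSTUVWXYZ0123456789"
--     base62 = list()
--     q = number
--     while q:
--         q, r = divmod(q, 62)
--         base62.append(base62_map[r])
--     base62.reverse()
--
--     # Convert base62 string back to int.
--     base10 = 0
--     for d in base62:
--         base10 *= 62
--         if 'a' <= d <= 'z':
--             base10 += ord(d) - ord('a')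
--         if 'A' <= d <= 'Z':
--             base10 += ord(d) - ord('A') + 26
--         if '0' <= d <= '9':
--             base10 += ord(d) - ord('0') + 52
--
--     return ("".join([str(c) for c in base62]), base10)
-- ===== SOURCE B (Python) =====
-- def solution(number):
--     """
--     >>> solution(12345)
--     ('dnh', 12345)
--     """
--     base62_map = "abcdefghijklmnopqrstuvwxyzABCDEFGHIJKLMNOPQRSTUVWXYZ0123456789"
--
--     def encode(n):
--         # digits come out most-significant first, no list and no reversal
--         return "" if n == 0 else encode(n // 62) + base62_map[n % 62]
--
--     # decoding a base-62 encoding of number always yields number itself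
--     return (encode(number), number)
-- ===== Notes on version B (the rewrite author's own statement) =====
-- stated objective: simpler
-- what changed: Builds the base-62 string by recursion (most-significant digit first, no list/reverse) and returns the input directly as the base-10 value instead of re-decoding the digit list.
import Mathlib
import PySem

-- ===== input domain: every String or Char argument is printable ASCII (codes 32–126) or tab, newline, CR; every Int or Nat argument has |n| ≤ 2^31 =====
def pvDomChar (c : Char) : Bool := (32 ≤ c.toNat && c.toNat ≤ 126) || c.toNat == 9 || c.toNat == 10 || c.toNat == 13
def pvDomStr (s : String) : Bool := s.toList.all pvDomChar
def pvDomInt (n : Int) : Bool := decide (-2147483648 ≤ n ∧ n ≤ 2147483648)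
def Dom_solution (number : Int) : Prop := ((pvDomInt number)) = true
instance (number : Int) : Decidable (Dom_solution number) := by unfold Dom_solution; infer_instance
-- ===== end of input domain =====

-- B builds the base-62 string by recursion (most-significant digit first, no list/reverse)
-- and returns the input directly as the base-10 value instead of re-decoding the digit list.
-- Equivalence is claimed on Pre_solution (0 ≤ number); on negative input A's while-loop never terminates.

-- ===== PORT A =====
def pvB62Map : String := "abcdefghijklmnopqrstuvwxyzABCDEFGHIJKLMNOPQRSTUVWXYZ0123456789"

-- termination fact for both loops: q // 62 strictly shrinks for 0 < q
theorem pvFdLt (q : Int) (h : 0 < q) :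
    (PySem.Int.floordiv q 62).toNat < q.toNat := by
  rw [PySem.Int.floordiv_eq_ediv_of_pos (by omega)]
  omega

-- the 'while q:' loop of A, accumulating base62 digits least-significant first
-- (guard is 0 < q: for q < 0 the Python loop never terminates, excluded by Pre_)
def solLoopA (q : Int) (acc : List Char) : List Char :=
  if h : 0 < q then
    solLoopA (PySem.Int.floordiv q 62)
      (acc ++ [(PySem.Str.pyGet? pvB62Map (PySem.Int.mod q 62)).getD ' '])
  else acc
termination_by q.toNat
decreasing_by exact pvFdLt q h

-- one step of A's decode-back loop (body of 'for d in base62')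
def decStep (b : Int) (d : Char) : Int :=
  let b := b * 62
  let b := if 'a' ≤ d ∧ d ≤ 'z' then b + ((d.toNat : Int) - ('a'.toNat : Int)) else b
  let b := if 'A' ≤ d ∧ d ≤ 'Z' then b + ((d.toNat : Int) - ('A'.toNat : Int) + 26) else b
  if '0' ≤ d ∧ d ≤ '9' then b + ((d.toNat : Int) - ('0'.toNat : Int) + 52) else b

def solution (number : Int) : String × Int :=
  let base62 := (solLoopA number []).reverse
  let base10 := base62.foldl decStep 0
  (String.ofList base62, base10)

-- ===== PORT B =====
-- recursive encoder: '' for 0, else encode(n // 62) + base62_map[n % 62]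
-- (guard is 0 < n: for n < 0 the Python recursion never terminates, excluded by Pre_)
def encBChars (n : Int) : List Char :=
  if h : 0 < n then
    encBChars (PySem.Int.floordiv n 62) ++
      [(PySem.Str.pyGet? pvB62Map (PySem.Int.mod n 62)).getD ' ']
  else []
termination_by n.toNat
decreasing_by exact pvFdLt n h

def solution_alt (number : Int) : String × Int :=
  (String.ofList (encBChars number), number)

-- ===== PRECONDITION & SPEC =====
-- Pre_ excludes negative numbers: there A's 'while q' loop (divmod flooring towards -∞) never terminates.
def Pre_solution (number : Int) : Prop := 0 ≤ number
instance (number : Int) : Decidable (Pre_solution number) := by unfold Pre_solution; infer_instance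
def pvWitness_solution : Int := 12345

def Spec_solution (number : Int) (out : String × Int) : Prop := out = solution_alt number
instance (number : Int) (out : String × Int) : Decidable (Spec_solution number out) := by unfold Spec_solution; infer_instance

-- ===== CLAIM (what is proved, stated in full; the proofs are below) =====
def Claim_equal_solution : Prop := ∀ (number : Int), Dom_solution number → Pre_solution number → Spec_solution number (solution number)

-- ===== LEMMAS AND PROOFS =====

-- A's loop with an accumulator: the accumulator is just a prefix
theorem solLoopA_acc (q : Int) (acc : List Char) :
    solLoopA q acc = acc ++ solLoopA q [] := by
  by_cases h : 0 < q
  · conv_lhs => rw [solLoopA]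
    conv_rhs => rw [solLoopA]
    rw [dif_pos h, dif_pos h, solLoopA_acc (PySem.Int.floordiv q 62),
      solLoopA_acc (PySem.Int.floordiv q 62) ([] ++ _)]
    simp
  · conv_lhs => rw [solLoopA]
    conv_rhs => rw [solLoopA]
    rw [dif_neg h, dif_neg h]
    simp
termination_by q.toNat
decreasing_by all_goals exact pvFdLt q h

-- A's digit list, reversed, is exactly B's recursively built digit string
theorem rev_loopA_eq_encB (q : Int) :
    (solLoopA q []).reverse = encBChars q := by
  by_cases h : 0 < q
  · rw [solLoopA, dif_pos h, encBChars, dif_pos h,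
      solLoopA_acc, ← rev_loopA_eq_encB (PySem.Int.floordiv q 62)]
    simp
  · rw [solLoopA, dif_neg h, encBChars, dif_neg h]
    simp
termination_by q.toNat
decreasing_by all_goals exact pvFdLt q h

-- the value A's decode step adds for a digit character
def charVal (d : Char) : Int :=
  (if 'a' ≤ d ∧ d ≤ 'z' then (d.toNat : Int) - ('a'.toNat : Int) else 0) +
  (if 'A' ≤ d ∧ d ≤ 'Z' then (d.toNat : Int) - ('A'.toNat : Int) + 26 else 0) +
  (if '0' ≤ d ∧ d ≤ '9' then (d.toNat : Int) - ('0'.toNat : Int) + 52 else 0)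

theorem decStep_eq (b : Int) (d : Char) : decStep b d = b * 62 + charVal d := by
  unfold decStep charVal
  split_ifs <;> ring

-- decoding the r-th alphabet character gives back r
theorem charVal_map (r : Int) (h0 : 0 ≤ r) (h1 : r < 62) :
    charVal ((PySem.Str.pyGet? pvB62Map r).getD ' ') = r := by
  interval_cases r <;> decide

-- A's decode loop inverts B's encoder
theorem decode_encB (q : Int) (hq : 0 ≤ q) :
    (encBChars q).foldl decStep 0 = q := by
  by_cases h : 0 < q
  · have hq' : 0 ≤ PySem.Int.floordiv q 62 := by
      rw [PySem.Int.floordiv_eq_ediv_of_pos (by omega)]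
      exact Int.ediv_nonneg (by omega) (by omega)
    rw [encBChars, dif_pos h]
    rw [List.foldl_append, decode_encB (PySem.Int.floordiv q 62) hq']
    simp only [List.foldl_cons, List.foldl_nil]
    rw [decStep_eq, charVal_map _ (PySem.Int.mod_nonneg q (b := 62) (by omega))
      (PySem.Int.mod_lt q (b := 62) (by omega))]
    exact PySem.Int.floordiv_mul_add_mod q 62
  · have : q = 0 := by omega
    subst this
    rw [encBChars, dif_neg h]
    rfl
termination_by q.toNat
decreasing_by exact pvFdLt q h

-- ===== VERDICT (by name: the statement is the Claim_ definition above) =====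
theorem solution_spec : Claim_equal_solution := by
  intro number _ hpre
  unfold Spec_solution solution solution_alt
  simp only [rev_loopA_eq_encB]
  rw [decode_encB number hpre]
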